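-- pv_equiv track=rewrite | github.com/j00hyun/hungry_dev | 주현/Dynamic Programming/lv2_땅따먹기.py | solution
-- ===== SOURCE A (Python) =====
-- def solution(land):
--     # before[i] -> i번째 행을 선택한다고 가정했을 때, 이전 행들 중 선택 가능한 인덱스
--     before = [(1, 2, 3), (0, 2, 3), (0, 1, 3), (0, 1, 2)]
--
--     # 두번째 행부터 각각 가능한 이전 행의 값들 중 최댓값을 더해 저장한다.
--     for i, arr in enumerate(land):
--
--         if i == 0:
--             continue
--
--         for j in range(4):
--             arr[j] += max([land[i - 1][k] for k in before[j]])
--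
--     return max(land[-1])
-- ===== SOURCE B (Python) =====
-- def solution(land):
--     # Alternative DP over the 4 game columns: one top-two scan of the previous
--     # (already updated) row per row, instead of a per-cell max over the three
--     # other columns.  Mutates land in place like the original.
--     for i in range(1, len(land)):
--         prev = land[i - 1]
--         m1 = m2 = None
--         idx = -1
--         for k in range(4):
--             v = prev[k]
--             if m1 is None or v > m1:
--                 m2, m1, idx = m1, v, k
--             elif m2 is None or v > m2:
--                 m2 = v
--         row = land[i]
--         for j in range(4):
--             row[j] += m2 if j == idx else m1
--     return max(land[-1])
-- ===== Notes on version B (the rewrite author's own statement) =====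
-- stated objective: alternative
-- what changed: Replaces A's per-cell max over the three other columns (four 3-element scans per row, via the hard-coded `before` index table) by a single top-two-with-argmax scan of the previous updated row: the argmax column gets the second maximum added, every other column the maximum.
import Mathlib
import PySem

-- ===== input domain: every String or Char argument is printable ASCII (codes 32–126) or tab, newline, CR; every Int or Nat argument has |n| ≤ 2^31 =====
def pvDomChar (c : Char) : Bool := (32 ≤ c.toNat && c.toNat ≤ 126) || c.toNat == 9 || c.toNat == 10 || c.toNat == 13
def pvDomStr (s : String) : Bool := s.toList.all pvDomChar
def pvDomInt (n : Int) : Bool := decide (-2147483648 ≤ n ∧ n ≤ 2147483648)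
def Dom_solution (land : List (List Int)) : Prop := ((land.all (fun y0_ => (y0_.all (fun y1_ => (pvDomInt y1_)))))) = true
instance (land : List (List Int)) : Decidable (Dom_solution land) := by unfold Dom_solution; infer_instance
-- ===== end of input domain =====

-- B replaces A's per-cell max over the three other columns by one top-two scan per row;
-- both Pythons mutate `land` in place, the equivalence proved here is about the return value.

-- ===== PORT A =====
-- the `before` tuple-of-tuples constant of A
def beforeA : List (List Int) := [[1, 2, 3], [0, 2, 3], [0, 1, 3], [0, 1, 2]]

-- body of A's `for i, arr in enumerate(land)` loop (the i = 0 iteration is `continue`)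
def stepA (L : List (List Int)) (i : Nat) : List (List Int) :=
  if i = 0 then L
  else
    (List.range 4).foldl (fun L j =>
      let arr := L.getD i []
      let m := (PySem.List.max? ((beforeA.getD j []).map
                  (fun k => PySem.List.pyGetD (PySem.List.pyGetD L ((i : Int) - 1) []) k 0))
                  (fun x => x)).getD 0
      L.set i (arr.set j (arr.getD j 0 + m))) L

def solution (land : List (List Int)) : Int :=
  let land2 := (List.range land.length).foldl stepA land
  (PySem.List.max? (PySem.List.pyGetD land2 (-1) []) (fun x => x)).getD 0

-- ===== PORT B =====
-- one step of B's top-two scan: state (m1, m2, idx), input (k, prev[k])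
def topTwoStep (st : Option Int × Option Int × Int) (kv : Int × Int) :
    Option Int × Option Int × Int :=
  if st.1 = none ∨ st.1.getD 0 < kv.2 then (some kv.2, st.1, kv.1)
  else if st.2.1 = none ∨ st.2.1.getD 0 < kv.2 then (st.1, some kv.2, st.2.2)
  else st

-- body of B's `for i in range(1, len(land))` loop
def stepB (L : List (List Int)) (ii : Int) : List (List Int) :=
  let i := ii.toNat  -- the loop index is nonnegative
  let prev := L.getD (i - 1) []
  let st := (List.range 4).foldl
      (fun st (k : Nat) => topTwoStep st ((k : Int), PySem.List.pyGetD prev (k : Int) 0))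
      (none, none, -1)
  let row := L.getD i []
  let row' := (List.range 4).foldl (fun r j =>
      r.set j (r.getD j 0 + (if (j : Int) = st.2.2 then st.2.1.getD 0 else st.1.getD 0))) row
  L.set i row'

def solution_alt (land : List (List Int)) : Int :=
  let land2 := (PySem.List.pyRange 1 land.length 1).foldl stepB land
  (PySem.List.max? (PySem.List.pyGetD land2 (-1) []) (fun x => x)).getD 0

-- ===== PRECONDITION & SPEC =====
-- Pre_ is exactly the set of inputs on which A returns normally: a single nonempty row
-- (the loop body never runs), or at least two rows all of length ≥ 4; on everything else
-- A raises IndexError (empty land, a row shorter than 4 reached by the loop) or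
-- ValueError (max of an empty last row).
def Pre_solution (land : List (List Int)) : Prop :=
  land ≠ [] ∧
    ((land.length = 1 ∧ land.getD 0 [] ≠ []) ∨
      (2 ≤ land.length ∧ ∀ row ∈ land, 4 ≤ row.length))

instance (land : List (List Int)) : Decidable (Pre_solution land) := by
  unfold Pre_solution; infer_instance

def pvWitness_solution : List (List Int) := [[1, 2, 3, 4], [5, 6, 7, 8]]

def Spec_solution (land : List (List Int)) (out : Int) : Prop := out = solution_alt land
instance (land : List (List Int)) (out : Int) : Decidable (Spec_solution land out) := by
  unfold Spec_solution; infer_instance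

-- ===== CLAIM (what is proved, stated in full; the proofs are below) =====
def Claim_equal_solution : Prop :=
  ∀ (land : List (List Int)), Dom_solution land → Pre_solution land →
    Spec_solution land (solution land)

-- ===== LEMMAS AND PROOFS =====

-- every row of L has length ≥ 4
def InvRows (L : List (List Int)) : Prop := ∀ r ∈ L, 4 ≤ r.length

-- the new row both steps write at position i, for prev = a::b::c::d::_, arr = w::x::y::z::u
def rowNew (a b c d w x y z : Int) (u : List Int) : List Int :=
  (w + max (max b c) d) :: (x + max (max a c) d) :: (y + max (max a b) d) ::
    (z + max (max a b) c) :: u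

theorem list_len4 {l : List Int} (h : 4 ≤ l.length) :
    ∃ a b c d t, l = a :: b :: c :: d :: t := by
  rcases l with _ | ⟨a, _ | ⟨b, _ | ⟨c, _ | ⟨d, t⟩⟩⟩⟩ <;> simp_all

theorem max3 (p q r : Int) :
    (PySem.List.max? [p, q, r] (fun x => x)).getD 0 = max (max p q) r := by
  simp only [PySem.List.max?]
  rcases lt_or_ge p q with h | h <;> simp [h] <;> split_ifs <;> simp [max_def] <;>
    split_ifs <;> simp_all <;> omega

theorem pyGetD4_0 (a b c d : Int) (t : List Int) :
    PySem.List.pyGetD (a :: b :: c :: d :: t) 0 0 = a := by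
  rw [(by norm_num : (0 : Int) = ((0 : Nat) : Int)), PySem.List.pyGetD_natCast]; rfl
theorem pyGetD4_1 (a b c d : Int) (t : List Int) :
    PySem.List.pyGetD (a :: b :: c :: d :: t) 1 0 = b := by
  rw [(by norm_num : (1 : Int) = ((1 : Nat) : Int)), PySem.List.pyGetD_natCast]; rfl
theorem pyGetD4_2 (a b c d : Int) (t : List Int) :
    PySem.List.pyGetD (a :: b :: c :: d :: t) 2 0 = c := by
  rw [(by norm_num : (2 : Int) = ((2 : Nat) : Int)), PySem.List.pyGetD_natCast]; rfl
theorem pyGetD4_3 (a b c d : Int) (t : List Int) :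
    PySem.List.pyGetD (a :: b :: c :: d :: t) 3 0 = d := by
  rw [(by norm_num : (3 : Int) = ((3 : Nat) : Int)), PySem.List.pyGetD_natCast]; rfl

theorem stepA_eq (L : List (List Int)) (i : Nat) (a b c d w x y z : Int) (t u : List Int)
    (hi : 1 ≤ i) (hlt : i < L.length)
    (hprev : L.getD (i - 1) [] = a :: b :: c :: d :: t)
    (harr : L.getD i [] = w :: x :: y :: z :: u) :
    stepA L i = L.set i (rowNew a b c d w x y z u) := by
  have hself : ∀ (r : List Int), (L.set i r).getD i [] = r := by
    intro r; rw [List.getD_eq_getElem?_getD]; simp [hlt]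
  have hprev' : ∀ (r : List Int), (L.set i r).getD (i - 1) [] = a :: b :: c :: d :: t := by
    intro r
    rw [List.getD_eq_getElem?_getD, ← hprev, List.getD_eq_getElem?_getD,
      List.getElem?_set_ne (by omega)]
  have hcast : (i : Int) - 1 = ((i - 1 : Nat) : Int) := by omega
  unfold stepA
  rw [if_neg (by omega : ¬ i = 0)]
  rw [(by rfl : List.range 4 = [0, 1, 2, 3])]
  simp only [List.foldl_cons, List.foldl_nil, hcast, PySem.List.pyGetD_natCast,
    hself, hprev', hprev, harr, List.set_set, beforeA, rowNew]
  congr 1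
  simp only [List.getD_cons_zero, List.getD_cons_succ, List.set_cons_zero, List.set_cons_succ,
    List.map_cons, List.map_nil, pyGetD4_0, pyGetD4_1, pyGetD4_2, pyGetD4_3, max3]

theorem topTwo4_sel (a b c d : Int) :
    ((fun st => ((if (0:Int) = st.2.2 then st.2.1.getD 0 else st.1.getD 0),
      (if (1:Int) = st.2.2 then st.2.1.getD 0 else st.1.getD 0),
      (if (2:Int) = st.2.2 then st.2.1.getD 0 else st.1.getD 0),
      (if (3:Int) = st.2.2 then st.2.1.getD 0 else st.1.getD 0)))
      (topTwoStep (topTwoStep (topTwoStep (topTwoStep (none, none, -1) (0, a)) (1, b)) (2, c))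
        (3, d)))
    = (max (max b c) d, max (max a c) d, max (max a b) d, max (max a b) c) := by
  norm_num
  have E1 : topTwoStep (none, none, -1) (0, a) = (some a, none, 0) := by
    simp only [topTwoStep]; split_ifs <;> simp_all
  rcases lt_or_ge a b with h2 | h2
  · have E2 : topTwoStep (some a, none, 0) (1, b) = (some b, some a, 1) := by
      simp only [topTwoStep]; split_ifs <;> simp_all
    rcases lt_or_ge b c with h3 | h3
    · have E3 : topTwoStep (some b, some a, 1) (2, c) = (some c, some b, 2) := by
        simp only [topTwoStep]; split_ifs <;> simp_all
      rcases lt_or_ge c d with h4 | h4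
      · have E4 : topTwoStep (some c, some b, 2) (3, d) = (some d, some c, 3) := by
          simp only [topTwoStep]; split_ifs <;> simp_all
        rw [E1, E2, E3, E4]
        norm_num
        exact ⟨by omega, by omega, by omega, by omega⟩
      · rcases lt_or_ge b d with h4' | h4'
        · have E4 : topTwoStep (some c, some b, 2) (3, d) = (some c, some d, 2) := by
            simp only [topTwoStep]; split_ifs <;> simp_all <;> omega
          rw [E1, E2, E3, E4]
          norm_num
          exact ⟨by omega, by omega, by omega, by omega⟩
        · have E4 : topTwoStep (some c, some b, 2) (3, d) = (some c, some b, 2) := by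
            simp only [topTwoStep]; split_ifs <;> simp_all <;> omega
          rw [E1, E2, E3, E4]
          norm_num
          exact ⟨by omega, by omega, by omega, by omega⟩
    · rcases lt_or_ge a c with h3' | h3'
      · have E3 : topTwoStep (some b, some a, 1) (2, c) = (some b, some c, 1) := by
          simp only [topTwoStep]; split_ifs <;> simp_all <;> omega
        rcases lt_or_ge b d with h4 | h4
        · have E4 : topTwoStep (some b, some c, 1) (3, d) = (some d, some b, 3) := by
            simp only [topTwoStep]; split_ifs <;> simp_all
          rw [E1, E2, E3, E4]
          norm_num
          exact ⟨by omega, by omega, by omega, by omega⟩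
        · rcases lt_or_ge c d with h4' | h4'
          · have E4 : topTwoStep (some b, some c, 1) (3, d) = (some b, some d, 1) := by
              simp only [topTwoStep]; split_ifs <;> simp_all <;> omega
            rw [E1, E2, E3, E4]
            norm_num
            exact ⟨by omega, by omega, by omega, by omega⟩
          · have E4 : topTwoStep (some b, some c, 1) (3, d) = (some b, some c, 1) := by
              simp only [topTwoStep]; split_ifs <;> simp_all <;> omega
            rw [E1, E2, E3, E4]
            norm_num
            exact ⟨by omega, by omega, by omega, by omega⟩
      · have E3 : topTwoStep (some b, some a, 1) (2, c) = (some b, some a, 1) := by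
          simp only [topTwoStep]; split_ifs <;> simp_all <;> omega
        rcases lt_or_ge b d with h4 | h4
        · have E4 : topTwoStep (some b, some a, 1) (3, d) = (some d, some b, 3) := by
            simp only [topTwoStep]; split_ifs <;> simp_all
          rw [E1, E2, E3, E4]
          norm_num
          exact ⟨by omega, by omega, by omega, by omega⟩
        · rcases lt_or_ge a d with h4' | h4'
          · have E4 : topTwoStep (some b, some a, 1) (3, d) = (some b, some d, 1) := by
              simp only [topTwoStep]; split_ifs <;> simp_all <;> omega
            rw [E1, E2, E3, E4]
            norm_num
            exact ⟨by omega, by omega, by omega, by omega⟩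
          · have E4 : topTwoStep (some b, some a, 1) (3, d) = (some b, some a, 1) := by
              simp only [topTwoStep]; split_ifs <;> simp_all <;> omega
            rw [E1, E2, E3, E4]
            norm_num
            exact ⟨by omega, by omega, by omega, by omega⟩
  · have E2 : topTwoStep (some a, none, 0) (1, b) = (some a, some b, 0) := by
      simp only [topTwoStep]; split_ifs <;> simp_all <;> omega
    rcases lt_or_ge a c with h3 | h3
    · have E3 : topTwoStep (some a, some b, 0) (2, c) = (some c, some a, 2) := by
        simp only [topTwoStep]; split_ifs <;> simp_all
      rcases lt_or_ge c d with h4 | h4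
      · have E4 : topTwoStep (some c, some a, 2) (3, d) = (some d, some c, 3) := by
          simp only [topTwoStep]; split_ifs <;> simp_all
        rw [E1, E2, E3, E4]
        norm_num
        exact ⟨by omega, by omega, by omega, by omega⟩
      · rcases lt_or_ge a d with h4' | h4'
        · have E4 : topTwoStep (some c, some a, 2) (3, d) = (some c, some d, 2) := by
            simp only [topTwoStep]; split_ifs <;> simp_all <;> omega
          rw [E1, E2, E3, E4]
          norm_num
          exact ⟨by omega, by omega, by omega, by omega⟩
        · have E4 : topTwoStep (some c, some a, 2) (3, d) = (some c, some a, 2) := by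
            simp only [topTwoStep]; split_ifs <;> simp_all <;> omega
          rw [E1, E2, E3, E4]
          norm_num
          exact ⟨by omega, by omega, by omega, by omega⟩
    · rcases lt_or_ge b c with h3' | h3'
      · have E3 : topTwoStep (some a, some b, 0) (2, c) = (some a, some c, 0) := by
          simp only [topTwoStep]; split_ifs <;> simp_all <;> omega
        rcases lt_or_ge a d with h4 | h4
        · have E4 : topTwoStep (some a, some c, 0) (3, d) = (some d, some a, 3) := by
            simp only [topTwoStep]; split_ifs <;> simp_all
          rw [E1, E2, E3, E4]
          norm_num
          exact ⟨by omega, by omega, by omega, by omega⟩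
        · rcases lt_or_ge c d with h4' | h4'
          · have E4 : topTwoStep (some a, some c, 0) (3, d) = (some a, some d, 0) := by
              simp only [topTwoStep]; split_ifs <;> simp_all <;> omega
            rw [E1, E2, E3, E4]
            norm_num
            exact ⟨by omega, by omega, by omega, by omega⟩
          · have E4 : topTwoStep (some a, some c, 0) (3, d) = (some a, some c, 0) := by
              simp only [topTwoStep]; split_ifs <;> simp_all <;> omega
            rw [E1, E2, E3, E4]
            norm_num
            exact ⟨by omega, by omega, by omega, by omega⟩
      · have E3 : topTwoStep (some a, some b, 0) (2, c) = (some a, some b, 0) := by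
          simp only [topTwoStep]; split_ifs <;> simp_all <;> omega
        rcases lt_or_ge a d with h4 | h4
        · have E4 : topTwoStep (some a, some b, 0) (3, d) = (some d, some a, 3) := by
            simp only [topTwoStep]; split_ifs <;> simp_all
          rw [E1, E2, E3, E4]
          norm_num
          exact ⟨by omega, by omega, by omega, by omega⟩
        · rcases lt_or_ge b d with h4' | h4'
          · have E4 : topTwoStep (some a, some b, 0) (3, d) = (some a, some d, 0) := by
              simp only [topTwoStep]; split_ifs <;> simp_all <;> omega
            rw [E1, E2, E3, E4]
            norm_num
            exact ⟨by omega, by omega, by omega, by omega⟩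
          · have E4 : topTwoStep (some a, some b, 0) (3, d) = (some a, some b, 0) := by
              simp only [topTwoStep]; split_ifs <;> simp_all <;> omega
            rw [E1, E2, E3, E4]
            norm_num
            exact ⟨by omega, by omega, by omega, by omega⟩

theorem stepB_eq (L : List (List Int)) (i : Nat) (a b c d w x y z : Int) (t u : List Int)
    (hprev : L.getD (i - 1) [] = a :: b :: c :: d :: t)
    (harr : L.getD i [] = w :: x :: y :: z :: u) :
    stepB L (i : Int) = L.set i (rowNew a b c d w x y z u) := by
  have key := topTwo4_sel a b c d
  simp only [Prod.mk.injEq] at key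
  obtain ⟨k0, k1, k2, k3⟩ := key
  unfold stepB
  simp only [Int.toNat_natCast, hprev, harr]
  rw [(by rfl : List.range 4 = [0, 1, 2, 3])]
  simp only [List.foldl_cons, List.foldl_nil, Nat.cast_ofNat, Nat.cast_zero, Nat.cast_one,
    pyGetD4_0, pyGetD4_1, pyGetD4_2, pyGetD4_3, List.set_cons_zero, List.set_cons_succ,
    List.getD_cons_zero, List.getD_cons_succ, rowNew]
  congr 1
  rw [k0, k1, k2, k3]

theorem loop_eq (k : Nat) : ∀ (i : Nat) (L : List (List Int)), 1 ≤ i → i + k ≤ L.length →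
    InvRows L →
    List.foldl stepA L (List.range' i k) =
      List.foldl stepB L (PySem.List.pyRange (i : Int) ((i : Int) + (k : Int)) 1) := by
  induction k with
  | zero =>
    intro i L _ _ _
    rw [PySem.List.pyRange_one_eq_nil (by omega)]
    rfl
  | succ k ih =>
    intro i L h1 h2 h3
    rw [List.range'_succ, PySem.List.pyRange_one_cons (by omega)]
    simp only [List.foldl_cons]
    have hmem : ∀ n : Nat, n < L.length → L.getD n [] ∈ L := by
      intro n hn
      rw [List.getD_eq_getElem?_getD, List.getElem?_eq_getElem hn]
      exact List.getElem_mem hn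
    obtain ⟨a, b, c, d, t, hprev⟩ := list_len4 (h3 _ (hmem (i - 1) (by omega)))
    obtain ⟨w, x, y, z, u, harr⟩ := list_len4 (h3 _ (hmem i (by omega)))
    rw [stepA_eq L i a b c d w x y z t u h1 (by omega) hprev harr,
      stepB_eq L i a b c d w x y z t u hprev harr]
    have hinv : InvRows (L.set i (rowNew a b c d w x y z u)) := by
      intro r hr
      rcases List.mem_or_eq_of_mem_set hr with h | h
      · exact h3 r h
      · rw [h, rowNew]; simp
    have := ih (i + 1) (L.set i (rowNew a b c d w x y z u)) (by omega) (by simp; omega) hinv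
    have e1 : (i : Int) + 1 = ((i + 1 : Nat) : Int) := by push_cast; ring
    have e2 : (i : Int) + ((k + 1 : Nat) : Int) = ((i + 1 : Nat) : Int) + (k : Int) := by
      push_cast; ring
    rw [e1, e2]
    exact this

-- ===== VERDICT (by name: the statement is the Claim_ definition above) =====
theorem solution_spec : Claim_equal_solution := by
  unfold Claim_equal_solution Spec_solution
  intro land _ hpre
  obtain ⟨hne, hcases⟩ := hpre
  obtain ⟨m, hm⟩ : ∃ m, land.length = m + 1 := by
    cases land with
    | nil => exact absurd rfl hne
    | cons h t => exact ⟨t.length, rfl⟩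
  unfold solution solution_alt
  have hr : List.range land.length = 0 :: List.range' 1 m := by
    rw [hm, List.range_eq_range', List.range'_succ]
  have h0 : stepA land 0 = land := by simp [stepA]
  rw [hr]
  simp only [List.foldl_cons, h0]
  rcases hcases with ⟨h1, _⟩ | ⟨_, h4⟩
  · -- a single row: neither loop runs
    have hm0 : m = 0 := by omega
    have hl0 : PySem.List.pyRange 1 (land.length) 1 = [] :=
      PySem.List.pyRange_one_eq_nil (by rw [h1]; norm_num)
    rw [hm0, hl0]
    rfl
  · have hl := loop_eq m 1 land (le_refl 1) (by omega) h4
    have hcast : ((1 : Nat) : Int) + (m : Int) = ((land.length : Nat) : Int) := by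
      rw [hm]; push_cast; ring
    rw [hl, hcast]
    norm_num
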